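-- pv_equiv track=rewrite | github.com/brianlo06/circuit-classifier | topology/circuit_classifier.py | _filter_rows_by_assignment
-- ===== SOURCE A (Python) =====
-- from typing import Dict, List, Optional, Tuple
--
-- def _filter_rows_by_assignment(
--     truth_table: List[Dict[str, int]],
--     assignment: Dict[str, str],
-- ) -> List[Dict[str, int]]:
--     """Filter rows where all inputs in each group have the same value."""
--     filtered = []
--     for row in truth_table:
--         # Check if all inputs assigned to the same representative have equal values
--         valid = True
--         for inp, rep in assignment.items():
--             if inp != rep and row[inp] != row[rep]:
--                 valid = False
--                 break
--         if valid:
--             filtered.append(row)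
--     return filtered
-- ===== SOURCE B (Python) =====
-- def _filter_rows_by_assignment(truth_table, assignment):
--     """Filter rows where all inputs in each group have the same value."""
--     candidates = list(truth_table)
--     for inp, rep in assignment.items():
--         if inp != rep:
--             candidates = [row for row in candidates if row[inp] == row[rep]]
--     return candidates
-- ===== Notes on version B (the rewrite author's own statement) =====
-- stated objective: alternative
-- what changed: B interchanges the loops: instead of A's per-row rescan of all assignment pairs with a valid flag and break, B makes one filtering pass over the remaining candidate rows per non-self assignment pair, progressively narrowing the row list.
import Mathlib
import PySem

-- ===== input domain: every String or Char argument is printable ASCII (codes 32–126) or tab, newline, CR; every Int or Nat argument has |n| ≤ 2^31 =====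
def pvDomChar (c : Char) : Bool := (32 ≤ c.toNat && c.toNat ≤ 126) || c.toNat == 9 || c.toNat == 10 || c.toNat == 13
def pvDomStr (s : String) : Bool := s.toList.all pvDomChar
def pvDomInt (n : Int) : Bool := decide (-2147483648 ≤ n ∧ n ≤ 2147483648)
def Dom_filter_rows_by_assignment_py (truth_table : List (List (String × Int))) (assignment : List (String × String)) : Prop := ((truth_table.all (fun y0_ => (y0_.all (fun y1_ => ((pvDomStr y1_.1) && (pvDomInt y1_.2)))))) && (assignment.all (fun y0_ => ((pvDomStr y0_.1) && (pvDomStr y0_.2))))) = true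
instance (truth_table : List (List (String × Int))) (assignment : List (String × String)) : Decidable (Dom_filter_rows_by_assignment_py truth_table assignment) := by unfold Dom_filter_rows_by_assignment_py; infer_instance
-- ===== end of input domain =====

-- B interchanges the loops: one filtering pass over the remaining rows per non-self assignment
-- pair, instead of A's per-row rescan of all pairs with a valid flag and break (objective: alternative).

-- ===== PORT A =====
-- row[k] for a dict row (none = KeyError)
def pvGet (row : List (String × Int)) (k : String) : Option Int :=
  PySem.Dict.get? (PySem.Dict.mk row) k

-- A's inner 'for inp, rep in assignment.items()' loop with its valid flag and break
def pvRowValidA (row : List (String × Int)) : List (String × String) → Bool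
  | [] => true
  | (inp, rep) :: rest =>
      if inp ≠ rep ∧ pvGet row inp ≠ pvGet row rep then false
      else pvRowValidA row rest

def filter_rows_by_assignment_py (truth_table : List (List (String × Int))) (assignment : List (String × String)) : List (List (String × Int)) :=
  truth_table.foldl
    (fun filtered row => if pvRowValidA row assignment then filtered ++ [row] else filtered)
    []

-- ===== PORT B =====
-- one stage per assignment pair: filter the surviving candidate rows on that pair's equality
def filter_rows_by_assignment_py_alt (truth_table : List (List (String × Int))) (assignment : List (String × String)) : List (List (String × Int)) :=
  assignment.foldl
    (fun candidates p =>
      if p.1 ≠ p.2 then candidates.filter (fun row => pvGet row p.1 == pvGet row p.2)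
      else candidates)
    truth_table

-- ===== PRECONDITION & SPEC =====
-- Pre_ excludes inputs where some non-self assignment pair names a key missing from some row:
-- there Python (both A and B) raises KeyError, except in the accidental case where an earlier
-- mismatching pair already dropped the row (both then return; see the cite in claim.json).
def Pre_filter_rows_by_assignment_py (truth_table : List (List (String × Int))) (assignment : List (String × String)) : Prop :=
  (truth_table.all (fun row => assignment.all (fun p =>
    (p.1 == p.2) || ((pvGet row p.1).isSome && (pvGet row p.2).isSome)))) = true
instance (truth_table : List (List (String × Int))) (assignment : List (String × String)) : Decidable (Pre_filter_rows_by_assignment_py truth_table assignment) := by unfold Pre_filter_rows_by_assignment_py; infer_instance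

def pvWitness_filter_rows_by_assignment_py : (List (List (String × Int))) × (List (String × String)) :=
  ([[("a", 0), ("b", 0)], [("a", 0), ("b", 1)]], [("a", "b"), ("b", "b")])

def Spec_filter_rows_by_assignment_py (truth_table : List (List (String × Int))) (assignment : List (String × String)) (out : List (List (String × Int))) : Prop := out = filter_rows_by_assignment_py_alt truth_table assignment
instance (truth_table : List (List (String × Int))) (assignment : List (String × String)) (out : List (List (String × Int))) : Decidable (Spec_filter_rows_by_assignment_py truth_table assignment out) := by unfold Spec_filter_rows_by_assignment_py; infer_instance

-- ===== CLAIM (what is proved, stated in full; the proofs are below) =====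
def Claim_equal_filter_rows_by_assignment_py : Prop := ∀ (truth_table : List (List (String × Int))) (assignment : List (String × String)), Dom_filter_rows_by_assignment_py truth_table assignment → Pre_filter_rows_by_assignment_py truth_table assignment → Spec_filter_rows_by_assignment_py truth_table assignment (filter_rows_by_assignment_py truth_table assignment)

-- ===== LEMMAS AND PROOFS =====

-- B's staged filtering over the pairs equals one filter by A's per-row check
theorem staged_eq_filter (l : List (String × String)) (cand : List (List (String × Int))) :
    l.foldl
      (fun candidates p =>
        if p.1 ≠ p.2 then candidates.filter (fun row => pvGet row p.1 == pvGet row p.2)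
        else candidates)
      cand
    = cand.filter (fun row => pvRowValidA row l) := by
  induction l generalizing cand with
  | nil => simp [pvRowValidA]
  | cons p rest ih =>
    obtain ⟨a, b⟩ := p
    simp only [List.foldl_cons]
    by_cases h : a = b
    · rw [if_neg (by simp [h])]
      rw [ih]
      apply List.filter_congr
      intro row _
      simp [pvRowValidA, h]
    · rw [if_pos (by simp [h])]
      rw [ih, List.filter_filter]
      apply List.filter_congr
      intro row _
      by_cases hq : pvGet row a = pvGet row b
      · simp [pvRowValidA, hq]
      · simp [pvRowValidA, hq, h]

-- ===== VERDICT (by name: the statement is the Claim_ definition above) =====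
theorem filter_rows_by_assignment_py_spec : Claim_equal_filter_rows_by_assignment_py := by
  intro truth_table assignment _ _
  unfold Spec_filter_rows_by_assignment_py filter_rows_by_assignment_py filter_rows_by_assignment_py_alt
  rw [PySem.List.foldl_append_if_eq_filter, staged_eq_filter]
  simp
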